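-- pv_equiv track=rewrite | github.com/wrightg42/young-engineers-16-17 | RPi/Coms.py | corrupted_bytes
-- ===== SOURCE A (Python) =====
-- def corrupted_bytes(bytes):
--     # Check each byte hasn't been corrupted
--     for byte in bytes:
--         binary = bin(byte)[2:]
--         if len(binary) % 2 == 1:
--             binary = "0" + binary
--         for i in range(int(len(binary) / 2)):
--             if binary[2 * i] == binary[2 * i + 1]:
--                 return True
--
--     return False
-- ===== SOURCE B (Python) =====
-- def corrupted_bytes(bytes):
--     # Integer bit arithmetic: check each adjacent bit pair (from the LSB) of every byte.
--     for byte in bytes: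
--         v = byte
--         while True:
--             if v & 3 in (0, 3):
--                 return True
--             v >>= 2
--             if v == 0:
--                 break
--     return False
-- ===== Notes on version B (the rewrite author's own statement) =====
-- stated objective: idiomatic
-- what changed: Replaces bin()-string formatting, padding and character indexing with pure integer bit arithmetic: a do-while loop tests whether the two lowest bits are equal via v & 3, then shifts right by two until v is exhausted.
-- outside the precondition, e.g. on corrupted_bytes([-5]): A returns False, B returns True
import Mathlib
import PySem

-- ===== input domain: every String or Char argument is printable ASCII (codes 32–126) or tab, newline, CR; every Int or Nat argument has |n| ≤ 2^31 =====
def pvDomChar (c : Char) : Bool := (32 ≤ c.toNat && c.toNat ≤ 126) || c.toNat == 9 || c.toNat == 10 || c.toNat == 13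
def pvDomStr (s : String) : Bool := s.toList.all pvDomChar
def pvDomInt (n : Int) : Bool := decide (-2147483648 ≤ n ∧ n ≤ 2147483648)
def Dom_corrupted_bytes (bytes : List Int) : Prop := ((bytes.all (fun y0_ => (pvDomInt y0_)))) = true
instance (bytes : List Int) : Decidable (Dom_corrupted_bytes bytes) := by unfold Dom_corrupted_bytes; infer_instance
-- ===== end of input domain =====

-- B replaces A's bin()-string formatting/padding/indexing by integer bit arithmetic (same cost; idiomatic).

-- ===== PORT A =====
-- bin(n)[2:] for n ≥ 0, as a list of '0'/'1' characters, most significant bit first (bin(0)[2:] = "0")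
def natBits (n : Nat) : List Char :=
  if n < 2 then [if n = 1 then '1' else '0']
  else natBits (n / 2) ++ [if n % 2 = 1 then '1' else '0']
  decreasing_by exact Nat.div_lt_self (by omega) (by omega)

-- the "0"-prefix padding to even length
def padEven (s : List Char) : List Char :=
  if s.length % 2 = 1 then '0' :: s else s

-- the inner indexed loop: binary[2*i] == binary[2*i+1] for i < len//2
def pairsEq : List Char → Bool
  | a :: b :: rest => (a == b) || pairsEq rest
  | _ => false

-- one iteration of A's outer loop (bin(byte)[2:] keeps the 'b' of "-0b…" for a negative byte)
def byteBad (b : Int) : Bool :=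
  pairsEq (padEven (if b < 0 then 'b' :: natBits (-b).toNat else natBits b.toNat))

def corrupted_bytes (bytes : List Int) : Bool := bytes.any byteBad

-- ===== PORT B =====
-- termination measure for pairLoop (cited by its decreasing_by)
theorem pairLoop_dec (v : Int) (h1 : ¬(PySem.Int.mod v 4 = 0 ∨ PySem.Int.mod v 4 = 3))
    (h2 : ¬ PySem.Int.floordiv v 4 = 0) : (PySem.Int.floordiv v 4).natAbs < v.natAbs := by
  rw [PySem.Int.mod_eq_emod_of_pos (by norm_num)] at h1
  rw [PySem.Int.floordiv_eq_ediv_of_pos (by norm_num)] at h2 ⊢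
  omega

-- B's do-while loop over one byte: test the two lowest bits, then shift by two, stop at 0
def pairLoop (v : Int) : Bool :=
  if PySem.Int.mod v 4 = 0 ∨ PySem.Int.mod v 4 = 3 then true
  else if PySem.Int.floordiv v 4 = 0 then false
  else pairLoop (PySem.Int.floordiv v 4)
  termination_by v.natAbs
  decreasing_by exact pairLoop_dec v (by assumption) (by assumption)

def corrupted_bytes_alt (bytes : List Int) : Bool := bytes.any pairLoop

-- ===== PRECONDITION & SPEC =====
-- Pre_ excludes lists containing a negative byte: there bin(byte)[2:] starts with the 'b' of the
-- "-0b" prefix, which A compares as if it were a bit — an accident of the string representation.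
def Pre_corrupted_bytes (bytes : List Int) : Prop := ∀ b ∈ bytes, 0 ≤ b
instance (bytes : List Int) : Decidable (Pre_corrupted_bytes bytes) := by
  unfold Pre_corrupted_bytes; infer_instance

def pvWitness_corrupted_bytes : List Int := [170, 5, 12]

def Spec_corrupted_bytes (bytes : List Int) (out : Bool) : Prop := out = corrupted_bytes_alt bytes
instance (bytes : List Int) (out : Bool) : Decidable (Spec_corrupted_bytes bytes out) := by
  unfold Spec_corrupted_bytes; infer_instance

-- ===== CLAIM (what is proved, stated in full; the proofs are below) =====
def Claim_equal_corrupted_bytes : Prop := ∀ (bytes : List Int), Dom_corrupted_bytes bytes → Pre_corrupted_bytes bytes → Spec_corrupted_bytes bytes (corrupted_bytes bytes)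

-- ===== LEMMAS AND PROOFS =====

-- padEven always produces an even-length list
theorem padEven_len (s : List Char) : (padEven s).length % 2 = 0 := by
  unfold padEven
  split
  · simp only [List.length_cons]; omega
  · omega

-- pairsEq over an even-length prefix followed by one extra pair
theorem pairsEq_append : ∀ (xs : List Char), xs.length % 2 = 0 → ∀ (a b : Char),
    pairsEq (xs ++ [a, b]) = (pairsEq xs || (a == b))
  | [], _, a, b => by simp [pairsEq]
  | [x], h, a, b => by simp at h
  | x :: y :: rest, h, a, b => by
      have h' : rest.length % 2 = 0 := by simp only [List.length_cons] at h; omega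
      simp only [List.cons_append, pairsEq, pairsEq_append rest h' a b, Bool.or_assoc]

-- peeling the two lowest bits off natBits (n ≥ 4)
theorem natBits_step (n : Nat) (h : 4 ≤ n) :
    natBits n = natBits (n / 4) ++
      [if (n / 2) % 2 = 1 then '1' else '0', if n % 2 = 1 then '1' else '0'] := by
  rw [natBits]
  rw [if_neg (by omega)]
  rw [natBits]
  rw [if_neg (by omega)]
  have : n / 2 / 2 = n / 4 := by omega
  rw [this, List.append_assoc]
  rfl

theorem padEven_step (n : Nat) (h : 4 ≤ n) :
    padEven (natBits n) = padEven (natBits (n / 4)) ++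
      [if (n / 2) % 2 = 1 then '1' else '0', if n % 2 = 1 then '1' else '0'] := by
  rw [natBits_step n h]
  unfold padEven
  simp only [List.length_append, List.length_cons, List.length_nil]
  split_ifs with h1 h2 h2 <;> first | omega | simp

theorem mod_cast4 (n : Nat) : PySem.Int.mod (n : Int) 4 = ((n % 4 : Nat) : Int) := by
  rw [PySem.Int.mod_eq_emod_of_pos (by norm_num)]; omega

theorem div_cast4 (n : Nat) : PySem.Int.floordiv (n : Int) 4 = ((n / 4 : Nat) : Int) := by
  rw [PySem.Int.floordiv_eq_ediv_of_pos (by norm_num)]; omega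

-- per-byte equivalence on nonnegative values
theorem byte_main : ∀ (n : Nat), pairsEq (padEven (natBits n)) = pairLoop (n : Int) := by
  intro n
  induction n using Nat.strong_induction_on with
  | _ n ih =>
    by_cases h4 : n < 4
    · interval_cases n <;>
        · rw [pairLoop, mod_cast4, div_cast4]
          simp [natBits, padEven, pairsEq]
    · have h4 : 4 ≤ n := by omega
      rw [padEven_step n h4, pairsEq_append _ (padEven_len _),
          pairLoop, mod_cast4, div_cast4]
      have e2 : n % 2 = n % 4 % 2 := by omega
      have e1 : (n / 2) % 2 = n % 4 / 2 := by omega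
      have hr : n % 4 < 4 := by omega
      have hd0 : n / 4 ≠ 0 := by omega
      have ihq := ih (n / 4) (by omega)
      rw [e1, e2]
      interval_cases h : n % 4 <;>
        simp_all <;> omega

theorem byte_eq (b : Int) (hb : 0 ≤ b) : byteBad b = pairLoop b := by
  obtain ⟨n, rfl⟩ := Int.eq_ofNat_of_zero_le hb
  unfold byteBad
  rw [if_neg (by omega), Int.toNat_natCast]
  exact byte_main n

-- ===== VERDICT (by name: the statement is the Claim_ definition above) =====
theorem corrupted_bytes_spec : Claim_equal_corrupted_bytes := by
  intro bytes hdom hpre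
  unfold Spec_corrupted_bytes corrupted_bytes corrupted_bytes_alt
  induction bytes with
  | nil => rfl
  | cons b bs ih =>
    have hb := hpre b (by simp)
    have hbs : Pre_corrupted_bytes bs := fun x hx => hpre x (by simp [hx])
    have hdbs : Dom_corrupted_bytes bs := by
      unfold Dom_corrupted_bytes at hdom ⊢; simp_all
    simp only [List.any_cons, byte_eq b hb, ih hdbs hbs]
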